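-- pv_equiv track=rewrite | github.com/seokju7/cospro-python | problem 4.py | solution
-- ===== SOURCE A (Python) =====
-- def solution(arr):
--     counter = {}
--     for i in arr:
--         if i not in counter:
--             counter[i] = 1
--         else:
--             counter[i] += 1
--     keys = list(counter.keys())
--     count_max = counter.get(max(keys))
--     count_min = counter.get(min(keys))
--     answer = (count_max // count_min)
--     return answer
-- ===== SOURCE B (Python) =====
-- def solution(arr):
--     it = iter(arr)
--     v = next(it)
--     mx, cmx, mn, cmn = v, 1, v, 1
--     for x in it:
--         if x > mx:
--             mx, cmx = x, 1
--         elif x == mx: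
--             cmx += 1
--         if x < mn:
--             mn, cmn = x, 1
--         elif x == mn:
--             cmn += 1
--     return cmx // cmn
-- ===== Notes on version B (the rewrite author's own statement) =====
-- stated objective: faster
-- what changed: Replaces A's full frequency table (dict built in one loop, then indexed at max/min of its keys) with a single streaming pass that maintains only the running maximum and minimum together with their occurrence counts, so no count table or key list ever exists.
import Mathlib
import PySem

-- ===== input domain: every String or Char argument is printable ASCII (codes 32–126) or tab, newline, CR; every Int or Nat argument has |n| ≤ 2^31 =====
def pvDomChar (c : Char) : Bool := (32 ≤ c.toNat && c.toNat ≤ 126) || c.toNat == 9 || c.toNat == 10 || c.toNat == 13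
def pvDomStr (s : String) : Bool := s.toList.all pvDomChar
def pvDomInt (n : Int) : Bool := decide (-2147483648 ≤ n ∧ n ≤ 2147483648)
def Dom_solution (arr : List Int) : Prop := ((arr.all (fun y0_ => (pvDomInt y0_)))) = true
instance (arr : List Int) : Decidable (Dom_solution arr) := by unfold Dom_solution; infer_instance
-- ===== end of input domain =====

-- B replaces A's frequency table with a single streaming pass that keeps only the
-- running max/min and their occurrence counts (objective: alternative, O(1) extra space).

-- ===== PORT A =====
-- literal port: build counter dict over arr, take max/min of its keys, divide their counts.
-- counter.get(max(keys)) always hits a present key, so it is ported as getD with default 0;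
-- max/min of the empty key list raise ValueError in Python (arr = []), excluded by Pre_.
def solution (arr : List Int) : Int :=
  let counter : PySem.Dict Int Int :=
    arr.foldl (fun c i =>
      if !(c.contains i) then c.insert i 1
      else c.insert i (c.getD i 0 + 1)) PySem.Dict.empty
  let keys := counter.keys
  match PySem.List.max? keys (fun y => y), PySem.List.min? keys (fun y => y) with
  | some mx, some mn => PySem.Int.floordiv (counter.getD mx 0) (counter.getD mn 0)
  | _, _ => 0  -- unreachable under Pre_solution (Python raises ValueError)

-- ===== PORT B =====
-- one loop step of B: update (mx, cmx, mn, cmn) with the next element x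
def pvStepB (s : Int × Int × Int × Int) (x : Int) : Int × Int × Int × Int :=
  let p := if s.1 < x then (x, (1 : Int))
           else if x = s.1 then (s.1, s.2.1 + 1) else (s.1, s.2.1)
  let q := if x < s.2.2.1 then (x, (1 : Int))
           else if x = s.2.2.1 then (s.2.2.1, s.2.2.2 + 1) else (s.2.2.1, s.2.2.2)
  (p.1, p.2, q.1, q.2)

def solution_alt (arr : List Int) : Int :=
  match arr with
  | [] => 0  -- unreachable under Pre_solution (Python: next(it) raises StopIteration)
  | v :: rest =>
    let s := rest.foldl pvStepB (v, 1, v, 1)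
    PySem.Int.floordiv s.2.1 s.2.2.2

-- ===== PRECONDITION & SPEC =====
-- Pre_ excludes only the empty list, on which A (max of an empty sequence) raises ValueError.
def Pre_solution (arr : List Int) : Prop := arr ≠ []
instance (arr : List Int) : Decidable (Pre_solution arr) := by unfold Pre_solution; infer_instance
def pvWitness_solution : List Int := [3, 1, 3]

def Spec_solution (arr : List Int) (out : Int) : Prop := out = solution_alt arr
instance (arr : List Int) (out : Int) : Decidable (Spec_solution arr out) := by unfold Spec_solution; infer_instance

-- ===== CLAIM (what is proved, stated in full; the proofs are below) =====
def Claim_equal_solution : Prop := ∀ (arr : List Int), Dom_solution arr → Pre_solution arr → Spec_solution arr (solution arr)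

-- ===== LEMMAS AND PROOFS =====

-- invariant of B's loop: the state is (max of L, its count, min of L, its count)
def InvB (L : List Int) (s : Int × Int × Int × Int) : Prop :=
  s.1 ∈ L ∧ (∀ y ∈ L, y ≤ s.1) ∧ s.2.1 = (L.count s.1 : Int) ∧
  s.2.2.1 ∈ L ∧ (∀ y ∈ L, s.2.2.1 ≤ y) ∧ s.2.2.2 = (L.count s.2.2.1 : Int)

lemma invB_step (L : List Int) (s : Int × Int × Int × Int) (x : Int)
    (h : InvB L s) : InvB (L ++ [x]) (pvStepB s x) := by
  obtain ⟨hm, hle, hc, hn, hge, hd⟩ := h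
  unfold pvStepB InvB
  by_cases h1 : s.1 < x
  · by_cases h2 : x < s.2.2.1
    · -- x both new max and new min: impossible unless... min ≤ max so x < min ≤ max < x, contra
      exfalso; exact absurd (lt_trans h2 (lt_of_le_of_lt (hge _ hm) h1)) (lt_irrefl x)
    · simp only [if_pos h1, if_neg h2]
      by_cases h3 : x = s.2.2.1
      · simp only [if_pos h3]
        have hxnot : x ∉ L := fun hx => absurd (hle _ hx) (not_le.mpr h1)
        refine ⟨by simp, ?_, ?_, by simp [hn], ?_, ?_⟩
        · intro y hy; rcases List.mem_append.mp hy with hy | hy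
          · exact le_of_lt (lt_of_le_of_lt (hle _ hy) h1)
          · simp at hy; omega
        · simp [List.count_append, List.count_eq_zero_of_not_mem hxnot]
        · intro y hy; rcases List.mem_append.mp hy with hy | hy
          · exact hge _ hy
          · simp at hy; omega
        · simp [List.count_append, hd, h3]
      · simp only [if_neg h3]
        have hxnot : x ∉ L := fun hx => absurd (hle _ hx) (not_le.mpr h1)
        refine ⟨by simp, ?_, ?_, by simp [hn], ?_, ?_⟩
        · intro y hy; rcases List.mem_append.mp hy with hy | hy
          · exact le_of_lt (lt_of_le_of_lt (hle _ hy) h1)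
          · simp at hy; omega
        · simp [List.count_append, List.count_eq_zero_of_not_mem hxnot]
        · intro y hy; rcases List.mem_append.mp hy with hy | hy
          · exact hge _ hy
          · simp at hy; omega
        · have : x ≠ s.2.2.1 := h3
          simp [List.count_append, hd, List.count_singleton', this]
  · by_cases h2 : x = s.1
    · simp only [if_neg h1, if_pos h2]
      by_cases h3 : x < s.2.2.1
      · exfalso; have := hge _ hm; omega
      · simp only [if_neg h3]
        by_cases h4 : x = s.2.2.1
        · simp only [if_pos h4]
          refine ⟨by simp [hm], ?_, ?_, by simp [hn], ?_, ?_⟩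
          · intro y hy; rcases List.mem_append.mp hy with hy | hy
            · exact hle _ hy
            · simp at hy; omega
          · simp [List.count_append, hc, h2]
          · intro y hy; rcases List.mem_append.mp hy with hy | hy
            · exact hge _ hy
            · simp at hy; omega
          · simp [List.count_append, hd, h4]
        · simp only [if_neg h4]
          refine ⟨by simp [hm], ?_, ?_, by simp [hn], ?_, ?_⟩
          · intro y hy; rcases List.mem_append.mp hy with hy | hy
            · exact hle _ hy
            · simp at hy; omega
          · simp [List.count_append, hc, h2]
          · intro y hy; rcases List.mem_append.mp hy with hy | hy
            · exact hge _ hy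
            · simp at hy; omega
          · simp [List.count_append, hd, List.count_singleton', h4]
    · simp only [if_neg h1, if_neg h2]
      by_cases h3 : x < s.2.2.1
      · simp only [if_pos h3]
        have hxnot : x ∉ L := fun hx => absurd h3 (not_lt.mpr (hge _ hx))
        refine ⟨by simp [hm], ?_, ?_, by simp, ?_, ?_⟩
        · intro y hy; rcases List.mem_append.mp hy with hy | hy
          · exact hle _ hy
          · simp at hy; omega
        · simp [List.count_append, hc, List.count_singleton', h2]
        · intro y hy; rcases List.mem_append.mp hy with hy | hy
          · exact le_of_lt (lt_of_lt_of_le h3 (hge _ hy))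
          · simp at hy; omega
        · simp [List.count_append, List.count_eq_zero_of_not_mem hxnot]
      · by_cases h4 : x = s.2.2.1
        · simp only [if_neg h3, if_pos h4]
          refine ⟨by simp [hm], ?_, ?_, by simp [hn], ?_, ?_⟩
          · intro y hy; rcases List.mem_append.mp hy with hy | hy
            · exact hle _ hy
            · simp at hy; omega
          · simp [List.count_append, hc, List.count_singleton', h2]
          · intro y hy; rcases List.mem_append.mp hy with hy | hy
            · exact hge _ hy
            · simp at hy; omega
          · simp [List.count_append, hd, h4]
        · simp only [if_neg h3, if_neg h4]
          refine ⟨by simp [hm], ?_, ?_, by simp [hn], ?_, ?_⟩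
          · intro y hy; rcases List.mem_append.mp hy with hy | hy
            · exact hle _ hy
            · simp at hy; omega
          · simp [List.count_append, hc, List.count_singleton', h2]
          · intro y hy; rcases List.mem_append.mp hy with hy | hy
            · exact hge _ hy
            · simp at hy; omega
          · simp [List.count_append, hd, List.count_singleton', h4]

lemma invB_foldl (xs : List Int) : ∀ (L : List Int) (s : Int × Int × Int × Int),
    InvB L s → InvB (L ++ xs) (xs.foldl pvStepB s) := by
  induction xs with
  | nil => intro L s h; simpa using h
  | cons x xs ih =>
    intro L s h
    have := ih (L ++ [x]) (pvStepB s x) (invB_step L s x h)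
    simpa [List.append_assoc] using this

-- A's branchy counting loop builds exactly PySem.Dict.counter arr.
lemma foldA_eq_counter (arr : List Int) :
    arr.foldl (fun c i =>
      if !(c.contains i) then c.insert i 1
      else c.insert i (c.getD i 0 + 1)) PySem.Dict.empty = PySem.Dict.counter arr := by
  rw [← PySem.Dict.foldl_insert_getD_add_one_eq_counter]
  have hfun : (fun (c : PySem.Dict Int Int) i =>
      if !(c.contains i) then c.insert i 1
      else c.insert i (c.getD i 0 + 1)) =
      (fun (c : PySem.Dict Int Int) i => c.insert i (c.getD i 0 + 1)) := by
    funext c i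
    by_cases h : c.contains i = true
    · simp [h]
    · simp only [Bool.not_eq_true] at h
      simp [h, PySem.Dict.getD_of_not_contains c 0 h]
  rw [hfun]

-- max?/min? with the identity key depend only on membership.
lemma max?_id_congr (l₁ l₂ : List Int) (h : ∀ x, x ∈ l₁ ↔ x ∈ l₂) :
    PySem.List.max? l₁ (fun y => y) = PySem.List.max? l₂ (fun y => y) := by
  cases e₁ : PySem.List.max? l₁ (fun y => y) with
  | none =>
    rw [PySem.List.max?_eq_none_iff] at e₁
    cases e₂ : PySem.List.max? l₂ (fun y => y) with
    | none => rfl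
    | some m =>
      have := PySem.List.max?_mem e₂
      rw [← h] at this; simp [e₁] at this
  | some m₁ =>
    cases e₂ : PySem.List.max? l₂ (fun y => y) with
    | none =>
      rw [PySem.List.max?_eq_none_iff] at e₂
      have := PySem.List.max?_mem e₁
      rw [h] at this; simp [e₂] at this
    | some m₂ =>
      have h₁ := PySem.List.max?_isMax e₂ m₁ ((h m₁).mp (PySem.List.max?_mem e₁))
      have h₂ := PySem.List.max?_isMax e₁ m₂ ((h m₂).mpr (PySem.List.max?_mem e₂))
      exact congrArg some (le_antisymm h₁ h₂)

lemma min?_id_congr (l₁ l₂ : List Int) (h : ∀ x, x ∈ l₁ ↔ x ∈ l₂) :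
    PySem.List.min? l₁ (fun y => y) = PySem.List.min? l₂ (fun y => y) := by
  cases e₁ : PySem.List.min? l₁ (fun y => y) with
  | none =>
    rw [PySem.List.min?_eq_none_iff] at e₁
    cases e₂ : PySem.List.min? l₂ (fun y => y) with
    | none => rfl
    | some m =>
      have := PySem.List.min?_mem e₂
      rw [← h] at this; simp [e₁] at this
  | some m₁ =>
    cases e₂ : PySem.List.min? l₂ (fun y => y) with
    | none =>
      rw [PySem.List.min?_eq_none_iff] at e₂
      have := PySem.List.min?_mem e₁
      rw [h] at this; simp [e₂] at this
    | some m₂ =>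
      have h₁ := PySem.List.min?_isMin e₂ m₁ ((h m₁).mp (PySem.List.min?_mem e₁))
      have h₂ := PySem.List.min?_isMin e₁ m₂ ((h m₂).mpr (PySem.List.min?_mem e₂))
      exact congrArg some (le_antisymm h₂ h₁)

-- ===== VERDICT (by name: the statement is the Claim_ definition above) =====
theorem solution_spec : Claim_equal_solution := by
  intro arr _ hpre
  unfold Spec_solution
  obtain ⟨v, rest, rfl⟩ : ∃ v rest, arr = v :: rest := by
    cases arr with
    | nil => exact absurd rfl hpre
    | cons a t => exact ⟨a, t, rfl⟩
  have hinv : InvB (v :: rest) (rest.foldl pvStepB (v, 1, v, 1)) := by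
    have h0 : InvB [v] (v, 1, v, 1) := by
      unfold InvB; refine ⟨by simp, by simp, by simp, by simp, by simp, by simp⟩
    simpa using invB_foldl rest [v] (v, 1, v, 1) h0
  set s := rest.foldl pvStepB (v, 1, v, 1) with hs
  obtain ⟨hm, hle, hc, hn, hge, hd⟩ := hinv
  -- evaluate A
  unfold solution
  simp only [foldA_eq_counter, PySem.Dict.keys_counter]
  have hmem : ∀ x, x ∈ PySem.Set.ofList (v :: rest) ↔ x ∈ (v :: rest) :=
    PySem.Set.mem_ofList (v :: rest)
  rw [max?_id_congr _ (v :: rest) hmem, min?_id_congr _ (v :: rest) hmem]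
  cases emx : PySem.List.max? (v :: rest) (fun y => y) with
  | none => rw [PySem.List.max?_eq_none_iff] at emx; exact absurd emx (by simp)
  | some mx =>
    cases emn : PySem.List.min? (v :: rest) (fun y => y) with
    | none => rw [PySem.List.min?_eq_none_iff] at emn; exact absurd emn (by simp)
    | some mn =>
      have hmx : mx = s.1 :=
        le_antisymm (hle _ (PySem.List.max?_mem emx)) (PySem.List.max?_isMax emx s.1 hm)
      have hmn : mn = s.2.2.1 :=
        le_antisymm (PySem.List.min?_isMin emn s.2.2.1 hn) (hge _ (PySem.List.min?_mem emn))
      simp only [PySem.Dict.getD_counter, hmx, hmn]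
      rw [← hc, ← hd]
      rfl
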